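-- pv_equiv track=rewrite | github.com/lyfadvance/hua_wei | load_data.py | is_box_sufficient
-- ===== SOURCE A (Python) =====
-- def add(a,b):
--     return [a[i]+b[i] for i in range(min(len(a),len(b)))]
--
-- def is_box_sufficient(box,obj,box_scale):
--     sum_value=[0 for i in range(len(obj))]
--     for i in range(len(box)):
--         sum_value=add(sum_value,box[i])
--     sum_value=add(sum_value,obj)
--     for i in range(len(obj)):
--         if sum_value[i]>box_scale[i]:
--             return False
--     return True
-- ===== SOURCE B (Python) =====
-- def is_box_sufficient(box, obj, box_scale):
--     # column-major: one running scalar per dimension instead of repeated vector adds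
--     m = len(obj)
--     for row in box:
--         if len(row) < m:
--             m = len(row)
--     sum_value = []
--     for j in range(m):
--         s = 0
--         for row in box:
--             s += row[j]
--         s += obj[j]
--         sum_value.append(s)
--     for i in range(len(obj)):
--         if sum_value[i] > box_scale[i]:
--             return False
--     return True
-- ===== Notes on version B (the rewrite author's own statement) =====
-- stated objective: alternative
-- what changed: B accumulates each coordinate with a single column-major scalar sum (computing the usable length first, never rebuilding an intermediate list), instead of A's repeated elementwise vector additions that allocate a fresh truncated sum list per box row.
import Mathlib
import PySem

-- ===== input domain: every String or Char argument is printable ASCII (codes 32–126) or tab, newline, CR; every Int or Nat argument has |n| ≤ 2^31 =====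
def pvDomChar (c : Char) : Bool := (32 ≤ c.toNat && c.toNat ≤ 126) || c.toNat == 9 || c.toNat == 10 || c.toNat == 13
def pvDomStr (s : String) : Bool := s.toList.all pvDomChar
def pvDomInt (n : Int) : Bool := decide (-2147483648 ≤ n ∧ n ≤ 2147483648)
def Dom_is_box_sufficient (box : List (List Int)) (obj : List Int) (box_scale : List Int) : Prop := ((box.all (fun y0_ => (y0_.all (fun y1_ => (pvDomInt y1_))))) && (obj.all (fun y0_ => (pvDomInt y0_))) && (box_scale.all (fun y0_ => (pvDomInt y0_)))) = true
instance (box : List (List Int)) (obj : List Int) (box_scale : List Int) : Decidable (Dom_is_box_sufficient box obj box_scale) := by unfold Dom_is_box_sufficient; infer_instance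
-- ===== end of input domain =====

-- B replaces A's repeated elementwise vector additions by a column-major scalar accumulation per dimension (alternative decomposition, same cost; return-value equivalence).


-- ===== PORT A =====
-- add(a,b): elementwise sum up to the shorter length (indices are always in range there, so getD is exact)
def pvAdd (a b : List Int) : List Int :=
  (List.range (min a.length b.length)).map (fun i => a.getD i 0 + b.getD i 0)

-- final loop 'for i in range(len(obj)): if sum_value[i] > box_scale[i]: return False'
-- (inside Pre_ every index this loop reaches is in range, so getD is exact there)
def pvCheckA (s scale : List Int) : List Nat → Bool
  | [] => true
  | i :: rest => if s.getD i 0 > scale.getD i 0 then false else pvCheckA s scale rest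

def is_box_sufficient (box : List (List Int)) (obj : List Int) (box_scale : List Int) : Bool :=
  let sum0 := (List.range obj.length).map (fun _ => (0 : Int))
  let sum1 := box.foldl (fun sv row => pvAdd sv row) sum0
  let sum2 := pvAdd sum1 obj
  pvCheckA sum2 box_scale (List.range obj.length)

-- ===== PORT B =====
-- same final loop as Source B's third loop
def pvCheckB (s scale : List Int) : List Nat → Bool
  | [] => true
  | i :: rest => if s.getD i 0 > scale.getD i 0 then false else pvCheckB s scale rest

def is_box_sufficient_alt (box : List (List Int)) (obj : List Int) (box_scale : List Int) : Bool :=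
  let m := box.foldl (fun m row => if row.length < m then row.length else m) obj.length
  let sums := (List.range m).map (fun j =>
    (box.foldl (fun s row => s + row.getD j 0) 0) + obj.getD j 0)
  pvCheckB sums box_scale (List.range obj.length)

-- ===== PRECONDITION & SPEC =====
-- Pre_ is exactly the set of inputs on which A (and B, identically) returns instead of raising
-- IndexError: either every index of obj is safe (len(obj) ≤ the usable length m'), or some column
-- below m' already exceeds its scale so the early 'return False' fires before the bad index.
def Pre_is_box_sufficient (box : List (List Int)) (obj : List Int) (box_scale : List Int) : Prop :=
  obj.length ≤ min (box.foldl (fun m row => min m row.length) obj.length) box_scale.length ∨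
  ∃ i < min (box.foldl (fun m row => min m row.length) obj.length) box_scale.length,
    box_scale.getD i 0 < (box.map (fun r => r.getD i 0)).sum + obj.getD i 0
instance (box : List (List Int)) (obj : List Int) (box_scale : List Int) : Decidable (Pre_is_box_sufficient box obj box_scale) := by unfold Pre_is_box_sufficient; infer_instance
def pvWitness_is_box_sufficient : List (List Int) × List Int × List Int := ([[1, 2], [3, 4]], [1, 1], [10, 10])

def Spec_is_box_sufficient (box : List (List Int)) (obj : List Int) (box_scale : List Int) (out : Bool) : Prop := out = is_box_sufficient_alt box obj box_scale
instance (box : List (List Int)) (obj : List Int) (box_scale : List Int) (out : Bool) : Decidable (Spec_is_box_sufficient box obj box_scale out) := by unfold Spec_is_box_sufficient; infer_instance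

-- ===== CLAIM (what is proved, stated in full; the proofs are below) =====
def Claim_equal_is_box_sufficient : Prop := ∀ (box : List (List Int)) (obj : List Int) (box_scale : List Int), Dom_is_box_sufficient box obj box_scale → Pre_is_box_sufficient box obj box_scale → Spec_is_box_sufficient box obj box_scale (is_box_sufficient box obj box_scale)

-- ===== LEMMAS AND PROOFS =====

theorem pvAdd_length (a b : List Int) : (pvAdd a b).length = min a.length b.length := by
  simp [pvAdd]

theorem pvAdd_getD (a b : List Int) (i : Nat) (hi : i < min a.length b.length) :
    (pvAdd a b).getD i 0 = a.getD i 0 + b.getD i 0 := by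
  simp [pvAdd, List.getD, hi]

theorem sum0_getD (n i : Nat) : ((List.range n).map (fun _ => (0 : Int))).getD i 0 = 0 := by
  by_cases h : i < n
  · simp [List.getD, h]
  · simp [List.getD, Nat.le_of_not_lt h]

theorem fold_min_le (box : List (List Int)) (k : Nat) :
    box.foldl (fun m row => min m row.length) k ≤ k := by
  induction box generalizing k with
  | nil => exact Nat.le_refl k
  | cons row rest ih =>
    exact Nat.le_trans (ih (min k row.length)) (Nat.min_le_left _ _)

-- A's first loop: its length is the running minimum and coordinate i holds the column sum
theorem foldA_inv (box : List (List Int)) (acc : List Int) :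
    (box.foldl (fun sv row => pvAdd sv row) acc).length
      = box.foldl (fun m row => min m row.length) acc.length ∧
    ∀ i < box.foldl (fun m row => min m row.length) acc.length,
      (box.foldl (fun sv row => pvAdd sv row) acc).getD i 0 =
        box.foldl (fun s row => s + row.getD i 0) (acc.getD i 0) := by
  induction box generalizing acc with
  | nil => exact ⟨rfl, fun i _ => rfl⟩
  | cons row rest ih =>
    have h := ih (pvAdd acc row)
    rw [pvAdd_length] at h
    refine ⟨h.1, fun i hi => ?_⟩
    have hi' : i < min acc.length row.length :=
      Nat.lt_of_lt_of_le hi (fold_min_le rest _)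
    simp only [List.foldl_cons]
    rw [h.2 i hi, pvAdd_getD acc row i hi']

-- B's running-minimum loop computes the same minimum
theorem foldB_min (box : List (List Int)) (k : Nat) :
    box.foldl (fun m row => if row.length < m then row.length else m) k
      = box.foldl (fun m row => min m row.length) k := by
  induction box generalizing k with
  | nil => rfl
  | cons row rest ih =>
    simp only [List.foldl_cons]
    have : (if row.length < k then row.length else k) = min k row.length := by
      split_ifs with h <;> omega
    rw [this, ih]

theorem check_eq (s scale : List Int) (l : List Nat) :
    pvCheckA s scale l = pvCheckB s scale l := by
  induction l with
  | nil => rfl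
  | cons i rest ih => simp only [pvCheckA, pvCheckB, ih]

-- the two intermediate sum lists are EQUAL as lists (Int addition is order-independent)
theorem sums_eq (box : List (List Int)) (obj : List Int) :
    pvAdd (box.foldl (fun sv row => pvAdd sv row) ((List.range obj.length).map (fun _ => (0 : Int)))) obj
      = (List.range (box.foldl (fun m row => if row.length < m then row.length else m) obj.length)).map
          (fun j => (box.foldl (fun s row => s + row.getD j 0) 0) + obj.getD j 0) := by
  have hinv := foldA_inv box ((List.range obj.length).map (fun _ => (0 : Int)))
  rw [List.length_map, List.length_range] at hinv
  have hM : box.foldl (fun m row => min m row.length) obj.length ≤ obj.length :=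
    fold_min_le box obj.length
  apply List.ext_getElem
  · rw [pvAdd_length, hinv.1, foldB_min, List.length_map, List.length_range]; omega
  · intro i h1 h2
    have hiM : i < box.foldl (fun m row => min m row.length) obj.length := by
      rw [List.length_map, List.length_range, foldB_min] at h2; exact h2
    have hgd : (pvAdd (box.foldl (fun sv row => pvAdd sv row) ((List.range obj.length).map (fun _ => (0 : Int)))) obj).getD i 0
        = (box.foldl (fun s row => s + row.getD i 0) 0) + obj.getD i 0 := by
      rw [pvAdd_getD _ _ i (by rw [hinv.1]; omega), hinv.2 i hiM, sum0_getD]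
    rw [← List.getD_eq_getElem _ 0 h1, ← List.getD_eq_getElem _ 0 h2, hgd]
    simp [List.getD, foldB_min, hiM]

-- ===== VERDICT (by name: the statement is the Claim_ definition above) =====
theorem is_box_sufficient_spec : Claim_equal_is_box_sufficient := by
  intro box obj box_scale _ _
  show is_box_sufficient box obj box_scale = is_box_sufficient_alt box obj box_scale
  simp only [is_box_sufficient, is_box_sufficient_alt]
  rw [sums_eq box obj]
  exact check_eq _ _ _
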